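-- pv_equiv track=rewrite | github.com/Kim-Ju-Hyeon/Algorithm_Study | coders/backjoon/bj_1477.py | solution
-- ===== SOURCE A (Python) =====
-- def solution(N,M,L,input_list):
--     input_list.append(0)
--     input_list.append(L)
--
--     while M > 0:
--         input_list.sort()
--         term_list = []
--         max_term, max_idx = -1, None
--
--         for i in range(1, len(input_list)):
--             term = input_list[i] - input_list[i-1]
--             term_list.append(term)
--
--             if term > max_term:
--                 max_term = term
--                 max_idx = i
--
--
--         new_center = (input_list[max_idx] + input_list[max_idx-1]) // 2
--         input_list.append(new_center)
--         M -= 1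
--
--
--     input_list.sort()
--     term_list = []
--
--     for i in range(1, len(input_list)):
--         term = input_list[i] - input_list[i - 1]
--         term_list.append(term)
--
--     return max(term_list)
-- ===== SOURCE B (Python) =====
-- def solution(N, M, L, input_list):
--     # Sort once, then maintain a list of (left, right) gap pairs and split the
--     # leftmost largest gap in place M times -- no re-sorting per iteration.
--     # (Unlike A, this does not mutate the caller's input_list.)
--     pts = sorted(input_list + [0, L])
--     gaps = list(zip(pts, pts[1:]))
--     for _ in range(M):
--         j = 0
--         best = gaps[0][1] - gaps[0][0]
--         k = 1
--         for g in gaps[1:]: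
--             if g[1] - g[0] > best:
--                 j = k
--                 best = g[1] - g[0]
--             k += 1
--         a, b = gaps[j]
--         m = (a + b) // 2
--         gaps[j:j + 1] = [(a, m), (m, b)]
--     return max(b - a for a, b in gaps)
-- ===== Notes on version B (the rewrite author's own statement) =====
-- stated objective: alternative
-- what changed: B sorts the endpoints once and then maintains a list of (left,right) gap pairs, splitting the leftmost largest gap in place each round, instead of A's re-sorting the whole point list and re-deriving all adjacent differences on every iteration; B also leaves the caller's list unmutated.
import Mathlib
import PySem

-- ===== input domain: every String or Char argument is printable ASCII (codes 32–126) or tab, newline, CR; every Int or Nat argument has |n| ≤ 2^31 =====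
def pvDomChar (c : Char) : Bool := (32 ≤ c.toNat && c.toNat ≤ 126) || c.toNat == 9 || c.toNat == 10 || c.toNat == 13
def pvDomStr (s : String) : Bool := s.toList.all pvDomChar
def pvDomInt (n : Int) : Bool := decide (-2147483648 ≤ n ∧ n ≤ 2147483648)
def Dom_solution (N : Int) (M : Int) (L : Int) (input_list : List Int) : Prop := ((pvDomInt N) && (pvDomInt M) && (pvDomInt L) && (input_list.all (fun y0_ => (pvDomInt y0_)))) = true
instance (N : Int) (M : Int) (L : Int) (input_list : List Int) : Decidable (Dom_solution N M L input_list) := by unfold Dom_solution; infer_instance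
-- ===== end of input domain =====

-- B sorts the endpoints once and maintains a list of (left,right) gap pairs, splitting the
-- leftmost largest gap in place each round, instead of A's per-iteration full re-sort;
-- equivalence is about the RETURN value only (A mutates input_list in place, B does not).


-- ===== PORT A =====
-- A's inner for-loop: state (term_list, max_term, max_idx), i is the Python index
def aScan : List Int → Int → List Int → Int → Option Int → (List Int × Int × Option Int)
  | x :: y :: rest, i, terms, maxTerm, maxIdx =>
      if y - x > maxTerm then
        aScan (y :: rest) (i + 1) (terms ++ [y - x]) (y - x) (some i)
      else
        aScan (y :: rest) (i + 1) (terms ++ [y - x]) maxTerm maxIdx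
  | _, _, terms, maxTerm, maxIdx => (terms, maxTerm, maxIdx)
termination_by l _ _ _ _ => l.length

-- A's while-loop: runs max(M,0) times; sorts, scans for the max gap, appends the midpoint.
-- (the 'none' branch is unreachable: the list always has ≥ 2 elements, Python would crash there)
def aLoop : Nat → List Int → List Int
  | 0, l => l
  | k + 1, l =>
      let s := PySem.List.sorted l (fun x => x) false
      match (aScan s 1 [] (-1) none).2.2 with
      | none => s
      | some i =>
          let a := (PySem.List.pyGet? s (i - 1)).getD 0
          let b := (PySem.List.pyGet? s i).getD 0
          aLoop k (s ++ [PySem.Int.floordiv (a + b) 2])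

def solution (N : Int) (M : Int) (L : Int) (input_list : List Int) : Int :=
  let lf := aLoop M.toNat (input_list ++ [0, L])
  let s := PySem.List.sorted lf (fun x => x) false
  (PySem.List.max? (aScan s 1 [] (-1) none).1 (fun x => x)).getD 0

-- ===== PORT B =====
-- B's inner for-loop over gaps[1:]: k counts, j/best track the leftmost largest gap
def bArgmax : List (Int × Int) → Nat → Nat → Int → Nat
  | [], _, j, _ => j
  | g :: rest, k, j, best =>
      if g.2 - g.1 > best then bArgmax rest (k + 1) k (g.2 - g.1)
      else bArgmax rest (k + 1) j best

-- B's for _ in range(M): split gaps[j] into its two floor-halves in place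
def bLoop : Nat → List (Int × Int) → List (Int × Int)
  | 0, gs => gs
  | k + 1, gs =>
      match gs with
      | [] => gs
      | g0 :: rest =>
          let j := bArgmax rest 1 0 (g0.2 - g0.1)
          let ab := (gs[j]?).getD (0, 0)
          let m := PySem.Int.floordiv (ab.1 + ab.2) 2
          bLoop k (gs.take j ++ [(ab.1, m), (m, ab.2)] ++ gs.drop (j + 1))

def solution_alt (N : Int) (M : Int) (L : Int) (input_list : List Int) : Int :=
  let pts := PySem.List.sorted (input_list ++ [0, L]) (fun x => x) false
  let gs := bLoop M.toNat (pts.zip pts.tail)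
  (PySem.List.max? (gs.map (fun g => g.2 - g.1)) (fun x => x)).getD 0

-- ===== PRECONDITION & SPEC =====
def Spec_solution (N : Int) (M : Int) (L : Int) (input_list : List Int) (out : Int) : Prop := out = solution_alt N M L input_list
instance (N : Int) (M : Int) (L : Int) (input_list : List Int) (out : Int) : Decidable (Spec_solution N M L input_list out) := by unfold Spec_solution; infer_instance

-- ===== CLAIM (what is proved, stated in full; the proofs are below) =====
def Claim_equal_solution : Prop := ∀ (N : Int) (M : Int) (L : Int) (input_list : List Int), Dom_solution N M L input_list → Spec_solution N M L input_list (solution N M L input_list)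

-- ===== LEMMAS AND PROOFS =====

-- gap pairs of a point list
def pvGaps (s : List Int) : List (Int × Int) := s.zip s.tail

theorem pvGaps_cons₂ (x y : Int) (t : List Int) :
    pvGaps (x :: y :: t) = (x, y) :: pvGaps (y :: t) := rfl

-- what a successful lookup in pvGaps says about s
theorem pvGaps_get (s : List Int) (j : Nat) (a b : Int)
    (h : (pvGaps s)[j]? = some (a, b)) :
    s.drop j = a :: b :: s.drop (j + 2) := by
  induction j generalizing s with
  | zero =>
    match s with
    | [] => simp [pvGaps] at h
    | [x] => simp [pvGaps] at h
    | x :: y :: t =>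
      simp [pvGaps] at h
      simp [h.1, h.2]
  | succ j ih =>
    match s with
    | [] => simp [pvGaps] at h
    | [x] => simp [pvGaps] at h
    | x :: y :: t =>
      have := ih (y :: t) (by simpa [pvGaps] using h)
      simpa [List.drop_succ_cons] using this

-- splicing the midpoint into the point list splices the gap list
theorem pvGaps_insert (s : List Int) (j : Nat) (a b m : Int)
    (h : (pvGaps s)[j]? = some (a, b)) :
    pvGaps (s.take (j + 1) ++ m :: s.drop (j + 1))
      = (pvGaps s).take j ++ (a, m) :: (m, b) :: (pvGaps s).drop (j + 1) := by
  induction j generalizing s with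
  | zero =>
    match s with
    | [] => simp [pvGaps] at h
    | [x] => simp [pvGaps] at h
    | x :: y :: t =>
      simp [pvGaps] at h
      simp [pvGaps, h.1, h.2]
  | succ j ih =>
    match s with
    | [] => simp [pvGaps] at h
    | [x] => simp [pvGaps] at h
    | x :: y :: t =>
      have h' : (pvGaps (y :: t))[j]? = some (a, b) := by simpa [pvGaps] using h
      have := ih (y :: t) h'
      -- take (j+2) (x::y::t) = x :: take (j+1) (y::t); pvGaps (x :: (y :: …))
      have hy : (y :: t).take (j + 1) ++ m :: (y :: t).drop (j + 1)
          = y :: (t.take j ++ m :: t.drop j) := by simp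
      simp only [List.take_succ_cons, List.drop_succ_cons, List.cons_append] at this ⊢
      rw [show pvGaps (x :: y :: (List.take j t ++ m :: List.drop j t))
            = (x, y) :: pvGaps (y :: (List.take j t ++ m :: List.drop j t)) from rfl,
          show pvGaps (x :: y :: t) = (x, y) :: pvGaps (y :: t) from rfl,
          this]
      simp

-- sorting after appending a value lying inside an adjacent pair = splicing it in
theorem sorted_insert_adjacent (s : List Int) (j : Nat) (a b m : Int)
    (hs : List.Pairwise (· ≤ ·) s)
    (h : (pvGaps s)[j]? = some (a, b)) (h1 : a ≤ m) (h2 : m ≤ b) :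
    PySem.List.sorted (s ++ [m]) (fun x => x) false
      = s.take (j + 1) ++ m :: s.drop (j + 1) := by
  have hd := pvGaps_get s j a b h
  have hsplit : s = s.take j ++ a :: b :: s.drop (j + 2) := by
    conv_lhs => rw [← List.take_append_drop j s]
    rw [hd]
  have ht1 : s.take (j + 1) = s.take j ++ [a] := by
    conv_lhs => rw [List.take_add]
    rw [hd]; rfl
  have hd1 : s.drop (j + 1) = b :: s.drop (j + 2) := by
    have : s.drop (j + 1) = (s.drop j).drop 1 := by rw [List.drop_drop, Nat.add_comm]
    rw [this, hd]; rfl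
  have hys : s.take (j + 1) ++ m :: s.drop (j + 1)
      = s.take j ++ a :: m :: b :: s.drop (j + 2) := by
    rw [ht1, hd1]; simp
  rw [hys]
  apply PySem.List.sorted_id_eq_of_perm_of_pairwise
  · have p1 : (s.take j ++ a :: m :: b :: s.drop (j + 2)).Perm (m :: s) := by
      conv_rhs => rw [hsplit]
      simpa using List.perm_middle (a := m) (l₁ := s.take j ++ [a]) (l₂ := b :: s.drop (j + 2))
    exact p1.trans (List.perm_append_singleton m s).symm
  · rw [hsplit] at hs
    simp only [List.pairwise_append, List.pairwise_cons, List.mem_cons] at hs ⊢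
    obtain ⟨pwt, ⟨ha, hb, pwr⟩, hcross⟩ := hs
    refine ⟨pwt, ⟨?_, ?_, hb, pwr⟩, ?_⟩
    · rintro a' (rfl | hrest)
      · exact h1
      · exact ha a' hrest
    · rintro a' (rfl | hrest)
      · exact h2
      · exact le_trans h2 (hb a' hrest)
    · rintro x hx y (rfl | rfl | hrest)
      · exact hcross x hx y (Or.inl rfl)
      · exact le_trans (hcross x hx a (Or.inl rfl)) h1
      · exact hcross x hx y (Or.inr hrest)

-- A's term list is the list of gap lengths
theorem aScan_terms (l : List Int) : ∀ (i : Int) (ts : List Int) (mt : Int) (mi : Option Int),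
    (aScan l i ts mt mi).1 = ts ++ (pvGaps l).map (fun g => g.2 - g.1) := by
  induction l with
  | nil => intro i ts mt mi; simp [aScan, pvGaps]
  | cons x l ih =>
    intro i ts mt mi
    match l with
    | [] => simp [aScan, pvGaps]
    | y :: rest =>
      rw [aScan]
      split <;> rw [ih] <;> simp [pvGaps]

-- A's argmax index = B's argmax gap index + 1
theorem scan_corr (rest : List Int) : ∀ (y : Int) (k j : Nat) (ts : List Int) (best : Int),
    (aScan (y :: rest) ((k : Int) + 1) ts best (some ((j : Int) + 1))).2.2
      = some ((bArgmax (pvGaps (y :: rest)) k j best : Int) + 1) := by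
  induction rest with
  | nil => intro y k j ts best; simp [aScan, pvGaps, bArgmax]
  | cons z rest ih =>
    intro y k j ts best
    rw [aScan, show pvGaps (y :: z :: rest) = (y, z) :: pvGaps (z :: rest) from rfl, bArgmax]
    by_cases h : z - y > best
    · simp only [h, if_pos]
      have := ih z (k + 1) k (ts ++ [z - y]) (z - y)
      push_cast at this ⊢
      convert this using 3
    · simp only [h, if_false]
      have := ih z (k + 1) j (ts ++ [z - y]) best
      push_cast at this ⊢
      convert this using 3

theorem bArgmax_lt (gs : List (Int × Int)) : ∀ (k j : Nat) (best : Int),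
    bArgmax gs k j best < max (j + 1) (k + gs.length) := by
  induction gs with
  | nil => intro k j best; simp [bArgmax]
  | cons g rest ih =>
    intro k j best
    rw [bArgmax]
    split
    · have := ih (k + 1) k (g.2 - g.1); simp at this ⊢; omega
    · have := ih (k + 1) j best; simp at this ⊢; omega

-- the main loop invariant
theorem loop_inv (k : Nat) : ∀ (l : List Int), 2 ≤ l.length →
    bLoop k (pvGaps (PySem.List.sorted l (fun x => x) false))
      = pvGaps (PySem.List.sorted (aLoop k l) (fun x => x) false) := by
  induction k with
  | zero => intro l h; rfl
  | succ k ih =>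
    intro l hl
    have hlen : 2 ≤ (PySem.List.sorted l (fun x => x) false).length := by
      rw [PySem.List.length_sorted]; exact hl
    obtain ⟨x0, x1, t, hs⟩ : ∃ x0 x1 t,
        PySem.List.sorted l (fun x => x) false = x0 :: x1 :: t := by
      match hx : PySem.List.sorted l (fun x => x) false with
      | [] => rw [hx] at hlen; simp at hlen
      | [x] => rw [hx] at hlen; simp at hlen
      | x0 :: x1 :: t => exact ⟨x0, x1, t, rfl⟩
    set s := PySem.List.sorted l (fun x => x) false with hsdef
    have hpw : List.Pairwise (· ≤ ·) s := PySem.List.sorted_pairwise l (fun x => x)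
    have hx01 : x0 ≤ x1 := by
      rw [hs] at hpw; exact (List.pairwise_cons.1 hpw).1 x1 (by simp)
    -- the chosen gap index
    set j := bArgmax (pvGaps (x1 :: t)) 1 0 (x1 - x0) with hjdef
    have hscan : (aScan s 1 [] (-1) none).2.2 = some ((j : Int) + 1) := by
      rw [hs, aScan, if_pos (by omega : x1 - x0 > (-1 : Int))]
      have := scan_corr t x1 1 0 [x1 - x0] (x1 - x0)
      norm_num at this
      norm_num
      exact this
    have hjlt : j < (pvGaps s).length := by
      have := bArgmax_lt (pvGaps (x1 :: t)) 1 0 (x1 - x0)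
      rw [hs, pvGaps_cons₂]
      simp at this ⊢
      omega
    obtain ⟨a, b, hab⟩ : ∃ a b, (pvGaps s)[j]? = some (a, b) := by
      have := List.getElem?_eq_getElem hjlt
      exact ⟨((pvGaps s)[j]).1, ((pvGaps s)[j]).2, this⟩
    have hdropj := pvGaps_get s j a b hab
    have hgetja : s[j]? = some a := by
      have h0 : s[j]? = (s.drop j)[0]? := by
        rw [List.getElem?_drop]; norm_num
      rw [h0, hdropj]; rfl
    have hgetjb : s[j + 1]? = some b := by
      have h0 : s[j + 1]? = (s.drop j)[1]? := by
        rw [List.getElem?_drop]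
      rw [h0, hdropj]; rfl
    have hable : a ≤ b := by
      have : List.Pairwise (· ≤ ·) (s.drop j) := hpw.drop
      rw [hdropj] at this
      exact (List.pairwise_cons.1 this).1 b (by simp)
    set m := PySem.Int.floordiv (a + b) 2 with hmdef
    have hm := PySem.Int.floordiv_two_mid_bounds hable
    -- A's step
    have hA : aLoop (k + 1) l = aLoop k (s ++ [m]) := by
      rw [aLoop, ← hsdef]
      rw [hscan]
      simp only []
      have e1 : PySem.List.pyGet? s ((j : Int) + 1 - 1) = some a := by
        rw [show ((j : Int) + 1 - 1) = (j : Nat) by omega,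
            PySem.List.pyGet?_natCast, hgetja]
      have e2 : PySem.List.pyGet? s ((j : Int) + 1) = some b := by
        rw [show ((j : Int) + 1) = ((j + 1 : Nat) : Int) by push_cast; ring,
            PySem.List.pyGet?_natCast, hgetjb]
      rw [e1, e2]
      rfl
    -- B's step
    have hB : bLoop (k + 1) (pvGaps s)
        = bLoop k ((pvGaps s).take j ++ [(a, m), (m, b)] ++ (pvGaps s).drop (j + 1)) := by
      conv_lhs => rw [hs, pvGaps_cons₂, bLoop]
      simp only [← hjdef, ← hs, ← pvGaps_cons₂ x0 x1 t]
      rw [hab]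
      rfl
    -- the spliced point list is the next sorted list
    have hsorted : PySem.List.sorted (s ++ [m]) (fun x => x) false
        = s.take (j + 1) ++ m :: s.drop (j + 1) :=
      sorted_insert_adjacent s j a b m hpw hab (by omega) (by omega)
    have hnext : pvGaps (PySem.List.sorted (s ++ [m]) (fun x => x) false)
        = (pvGaps s).take j ++ [(a, m), (m, b)] ++ (pvGaps s).drop (j + 1) := by
      rw [hsorted, pvGaps_insert s j a b m hab]; simp
    rw [hA, hB, ← hnext]
    exact ih (s ++ [m]) (by simp; omega)

-- ===== VERDICT (by name: the statement is the Claim_ definition above) =====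
theorem solution_spec : Claim_equal_solution := by
  unfold Claim_equal_solution Spec_solution
  intro N M L l _
  show (PySem.List.max? (aScan (PySem.List.sorted (aLoop M.toNat (l ++ [0, L])) (fun x => x) false) 1 [] (-1) none).1 (fun x => x)).getD 0
    = (PySem.List.max? ((bLoop M.toNat ((PySem.List.sorted (l ++ [0, L]) (fun x => x) false).zip (PySem.List.sorted (l ++ [0, L]) (fun x => x) false).tail)).map (fun g => g.2 - g.1)) (fun x => x)).getD 0
  rw [show (PySem.List.sorted (l ++ [0, L]) (fun x => x) false).zip
        (PySem.List.sorted (l ++ [0, L]) (fun x => x) false).tail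
      = pvGaps (PySem.List.sorted (l ++ [0, L]) (fun x => x) false) from rfl,
      loop_inv M.toNat (l ++ [0, L]) (by simp),
      aScan_terms]
  simp
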